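-- pv_equiv track=rewrite | github.com/sipyourdrink-ltd/bernstein | src/bernstein/cli/display/image_renderer.py | _sixel_palette
-- ===== SOURCE A (Python) =====
-- def _sixel_palette(pixels: list[int], palette: list[int]) -> list[str]:
--     """Build sixel palette entries for colors present in the image."""
--     out: list[str] = []
--     for ci in sorted(set(pixels)):
--         r = palette[ci * 3] * 100 // 255
--         g = palette[ci * 3 + 1] * 100 // 255
--         b = palette[ci * 3 + 2] * 100 // 255
--         out.append(f"#{ci};2;{r};{g};{b}")
--     return out
-- ===== SOURCE B (Python) =====
-- def _sixel_palette(pixels: list[int], palette: list[int]) -> list[str]: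
--     """Build sixel palette entries for colors present in the image."""
--     if not pixels:
--         return []
--     lo = min(pixels)
--     seen = [False] * (max(pixels) - lo + 1)
--     for p in pixels:
--         seen[p - lo] = True
--     out: list[str] = []
--     for off, hit in enumerate(seen):
--         if hit:
--             ci = lo + off
--             r = palette[ci * 3] * 100 // 255
--             g = palette[ci * 3 + 1] * 100 // 255
--             b = palette[ci * 3 + 2] * 100 // 255
--             out.append(f"#{ci};2;{r};{g};{b}")
--     return out
-- ===== Notes on version B (the rewrite author's own statement) =====
-- stated objective: alternative
-- what changed: Replaces sorted(set(pixels)) with a one-pass boolean bucket array over [min(pixels), max(pixels)] that is then scanned in ascending order, so the comparison sort disappears.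
import Mathlib
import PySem

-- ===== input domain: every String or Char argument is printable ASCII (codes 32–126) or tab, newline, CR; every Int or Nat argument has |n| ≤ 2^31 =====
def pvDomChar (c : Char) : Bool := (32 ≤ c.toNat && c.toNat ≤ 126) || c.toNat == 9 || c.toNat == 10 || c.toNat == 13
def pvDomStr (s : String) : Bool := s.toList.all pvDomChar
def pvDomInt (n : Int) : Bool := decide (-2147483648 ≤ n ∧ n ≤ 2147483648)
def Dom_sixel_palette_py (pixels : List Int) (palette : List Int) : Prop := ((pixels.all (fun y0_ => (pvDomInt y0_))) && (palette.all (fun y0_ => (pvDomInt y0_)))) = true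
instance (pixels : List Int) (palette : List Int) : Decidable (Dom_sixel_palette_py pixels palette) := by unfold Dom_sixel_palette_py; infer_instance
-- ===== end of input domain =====

-- B replaces A's sorted(set(pixels)) by a one-pass boolean bucket array over [min(pixels), max(pixels)]
-- scanned in ascending order (alternative decomposition; return values proved equal on Pre_).

-- ===== PORT A =====
-- literal transliteration of A: iterate sorted(set(pixels)); palette lookups via pyGet?
-- (none = IndexError, excluded by Pre_; the match's catch-all is unreachable under Pre_).
def sixel_palette_py (pixels : List Int) (palette : List Int) : List String :=
  (PySem.List.sorted (PySem.Set.ofList pixels) (fun x => x)).foldl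
    (fun out ci =>
      match PySem.List.pyGet? palette (ci * 3), PySem.List.pyGet? palette (ci * 3 + 1),
            PySem.List.pyGet? palette (ci * 3 + 2) with
      | some pr, some pg, some pb =>
          out ++ ["#" ++ PySem.Int.toStr ci ++ ";2;"
                  ++ PySem.Int.toStr (PySem.Int.floordiv (pr * 100) 255) ++ ";"
                  ++ PySem.Int.toStr (PySem.Int.floordiv (pg * 100) 255) ++ ";"
                  ++ PySem.Int.toStr (PySem.Int.floordiv (pb * 100) 255)]
      | _, _, _ => out)
    []

-- ===== PORT B =====
-- literal transliteration of Source B: mark a boolean bucket per color in one pass, then scan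
-- the buckets in ascending order via enumerate (palette lookups as in Source B, via pyGet?).
def sixel_palette_py_alt (pixels : List Int) (palette : List Int) : List String :=
  if pixels = [] then []
  else
    match PySem.List.min? pixels (fun x => x) with
    | none => []
    | some lo =>
      match PySem.List.max? pixels (fun x => x) with
      | none => []
      | some hi =>
      let seen0 := List.replicate (hi - lo + 1).toNat false
      let seen := pixels.foldl (fun s p => PySem.List.pySetD s (p - lo) true) seen0
      (PySem.List.enumerate seen).foldl
        (fun out oh =>
          if oh.2 then
            match PySem.List.pyGet? palette ((lo + oh.1) * 3) with
            | none => out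
            | some pr =>
              match PySem.List.pyGet? palette ((lo + oh.1) * 3 + 1) with
              | none => out
              | some pg =>
                match PySem.List.pyGet? palette ((lo + oh.1) * 3 + 2) with
                | none => out
                | some pb =>
                    out ++ ["#" ++ PySem.Int.toStr (lo + oh.1) ++ ";2;"
                            ++ PySem.Int.toStr (PySem.Int.floordiv (pr * 100) 255) ++ ";"
                            ++ PySem.Int.toStr (PySem.Int.floordiv (pg * 100) 255) ++ ";"
                            ++ PySem.Int.toStr (PySem.Int.floordiv (pb * 100) 255)]
          else out)
        []

-- ===== PRECONDITION & SPEC =====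
-- Pre_ excludes exactly the inputs on which A raises IndexError: some pixel's three palette
-- indices ci*3, ci*3+1, ci*3+2 are not all valid Python indices into palette.
def Pre_sixel_palette_py (pixels : List Int) (palette : List Int) : Prop :=
  ∀ ci ∈ pixels, PySem.Raise.InRange palette.length (ci * 3)
    ∧ PySem.Raise.InRange palette.length (ci * 3 + 1)
    ∧ PySem.Raise.InRange palette.length (ci * 3 + 2)
instance (pixels : List Int) (palette : List Int) : Decidable (Pre_sixel_palette_py pixels palette) := by
  unfold Pre_sixel_palette_py; infer_instance
def pvWitness_sixel_palette_py : List Int × List Int := ([1, 0, 1], [10, 20, 30, 250, 0, 255])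

def Spec_sixel_palette_py (pixels : List Int) (palette : List Int) (out : List String) : Prop := out = sixel_palette_py_alt pixels palette
instance (pixels : List Int) (palette : List Int) (out : List String) : Decidable (Spec_sixel_palette_py pixels palette out) := by unfold Spec_sixel_palette_py; infer_instance

-- ===== CLAIM (what is proved, stated in full; the proofs are below) =====
def Claim_equal_sixel_palette_py : Prop := ∀ (pixels : List Int) (palette : List Int), Dom_sixel_palette_py pixels palette → Pre_sixel_palette_py pixels palette → Spec_sixel_palette_py pixels palette (sixel_palette_py pixels palette)

-- ===== LEMMAS AND PROOFS =====

-- the palette entry string both programs build for color ci (total form; used only in proofs)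
def pvEntry (palette : List Int) (ci : Int) : String :=
  "#" ++ PySem.Int.toStr ci ++ ";2;"
    ++ PySem.Int.toStr (PySem.Int.floordiv (PySem.List.pyGetD palette (ci * 3) 0 * 100) 255) ++ ";"
    ++ PySem.Int.toStr (PySem.Int.floordiv (PySem.List.pyGetD palette (ci * 3 + 1) 0 * 100) 255) ++ ";"
    ++ PySem.Int.toStr (PySem.Int.floordiv (PySem.List.pyGetD palette (ci * 3 + 2) 0 * 100) 255)

def pvOk (palette : List Int) (ci : Int) : Prop :=
  PySem.Raise.InRange palette.length (ci * 3)
    ∧ PySem.Raise.InRange palette.length (ci * 3 + 1)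
    ∧ PySem.Raise.InRange palette.length (ci * 3 + 2)

-- boolean bucket marking: length is preserved
lemma pvMarkLen (lo : Int) (ps : List Int) (s : List Bool) :
    (ps.foldl (fun s p => PySem.List.pySetD s (p - lo) true) s).length = s.length := by
  induction ps generalizing s with
  | nil => rfl
  | cons p ps ih => simpa [PySem.List.length_pySetD] using ih (PySem.List.pySetD s (p - lo) true)

-- boolean bucket marking: bucket i ends up true iff it started true or some pixel maps to it
lemma pvMark (lo : Int) (ps : List Int) (s : List Bool)
    (hb : ∀ p ∈ ps, lo ≤ p ∧ (p - lo).toNat < s.length) (i : Nat) (hi : i < s.length) :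
    (ps.foldl (fun s p => PySem.List.pySetD s (p - lo) true) s)[i]? =
      some (s[i] || decide ((lo + (i : Int)) ∈ ps)) := by
  induction ps generalizing s with
  | nil => simp [List.getElem?_eq_getElem hi]
  | cons p ps ih =>
    obtain ⟨hlp, hlt⟩ := hb p (by simp)
    have hset : PySem.List.pySetD s (p - lo) true = s.set (p - lo).toNat true :=
      PySem.List.pySetD_of_nonneg s true (by omega)
    have hrec := ih (s.set (p - lo).toNat true)
      (by intro q hq; simpa using hb q (by simp [hq]))
      (by simpa using hi)
    rw [List.foldl_cons, hset, hrec]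
    congr 1
    have hmem : decide ((lo + (i : Int)) ∈ p :: ps)
        = (decide (lo + (i : Int) = p) || decide ((lo + (i : Int)) ∈ ps)) := by simp
    by_cases hcase : (p - lo).toNat = i
    · have hpi : decide (lo + (i : Int) = p) = true := by
        simp only [decide_eq_true_eq]; omega
      simp [hcase, hpi]
    · have hpi : decide (lo + (i : Int) = p) = false := by
        simp only [decide_eq_false_iff_not]; omega
      simp [hcase, hpi]

-- under Pre_, one palette-entry step of either loop appends the total-form entry string
lemma pvStepA (palette : List Int) (out : List String) (ci : Int) (h : pvOk palette ci) :
    (match PySem.List.pyGet? palette (ci * 3), PySem.List.pyGet? palette (ci * 3 + 1),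
           PySem.List.pyGet? palette (ci * 3 + 2) with
      | some pr, some pg, some pb =>
          out ++ ["#" ++ PySem.Int.toStr ci ++ ";2;"
                  ++ PySem.Int.toStr (PySem.Int.floordiv (pr * 100) 255) ++ ";"
                  ++ PySem.Int.toStr (PySem.Int.floordiv (pg * 100) 255) ++ ";"
                  ++ PySem.Int.toStr (PySem.Int.floordiv (pb * 100) 255)]
      | _, _, _ => out) = out ++ [pvEntry palette ci] := by
  obtain ⟨h1, h2, h3⟩ := h
  have e1 : PySem.List.pyGet? palette (ci * 3) = some (PySem.List.pyGetD palette (ci * 3) 0) := by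
    rcases he : PySem.List.pyGet? palette (ci * 3) with _ | v
    · exact absurd ((PySem.List.pyGet?_eq_none_iff _ _).mp he) (by simpa using h1)
    · simp [PySem.List.pyGetD, he]
  have e2 : PySem.List.pyGet? palette (ci * 3 + 1) = some (PySem.List.pyGetD palette (ci * 3 + 1) 0) := by
    rcases he : PySem.List.pyGet? palette (ci * 3 + 1) with _ | v
    · exact absurd ((PySem.List.pyGet?_eq_none_iff _ _).mp he) (by simpa using h2)
    · simp [PySem.List.pyGetD, he]
  have e3 : PySem.List.pyGet? palette (ci * 3 + 2) = some (PySem.List.pyGetD palette (ci * 3 + 2) 0) := by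
    rcases he : PySem.List.pyGet? palette (ci * 3 + 2) with _ | v
    · exact absurd ((PySem.List.pyGet?_eq_none_iff _ _).mp he) (by simpa using h3)
    · simp [PySem.List.pyGetD, he]
  rw [e1, e2, e3]
  rfl

-- A's loop over a list of valid colors is a map of the entry function
lemma pvFoldA (palette : List Int) (cs : List Int) (acc : List String)
    (h : ∀ ci ∈ cs, pvOk palette ci) :
    cs.foldl
      (fun out ci =>
        match PySem.List.pyGet? palette (ci * 3), PySem.List.pyGet? palette (ci * 3 + 1),
              PySem.List.pyGet? palette (ci * 3 + 2) with
        | some pr, some pg, some pb =>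
            out ++ ["#" ++ PySem.Int.toStr ci ++ ";2;"
                    ++ PySem.Int.toStr (PySem.Int.floordiv (pr * 100) 255) ++ ";"
                    ++ PySem.Int.toStr (PySem.Int.floordiv (pg * 100) 255) ++ ";"
                    ++ PySem.Int.toStr (PySem.Int.floordiv (pb * 100) 255)]
        | _, _, _ => out)
      acc = acc ++ cs.map (pvEntry palette) := by
  induction cs generalizing acc with
  | nil => simp
  | cons c cs ih =>
    rw [List.foldl_cons, pvStepA palette acc c (h c (by simp)),
      ih (acc ++ [pvEntry palette c]) (fun ci hci => h ci (by simp [hci]))]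
    simp

-- the same fact for B's tuple-shaped match
lemma pvStepB (palette : List Int) (out : List String) (ci : Int) (h : pvOk palette ci) :
    (match PySem.List.pyGet? palette (ci * 3) with
      | none => out
      | some pr =>
        match PySem.List.pyGet? palette (ci * 3 + 1) with
        | none => out
        | some pg =>
          match PySem.List.pyGet? palette (ci * 3 + 2) with
          | none => out
          | some pb =>
              out ++ ["#" ++ PySem.Int.toStr ci ++ ";2;"
                      ++ PySem.Int.toStr (PySem.Int.floordiv (pr * 100) 255) ++ ";"
                      ++ PySem.Int.toStr (PySem.Int.floordiv (pg * 100) 255) ++ ";"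
                      ++ PySem.Int.toStr (PySem.Int.floordiv (pb * 100) 255)]) = out ++ [pvEntry palette ci] := by
  obtain ⟨h1, h2, h3⟩ := h
  have e1 : PySem.List.pyGet? palette (ci * 3) = some (PySem.List.pyGetD palette (ci * 3) 0) := by
    rcases he : PySem.List.pyGet? palette (ci * 3) with _ | v
    · exact absurd ((PySem.List.pyGet?_eq_none_iff _ _).mp he) (by simpa using h1)
    · simp [PySem.List.pyGetD, he]
  have e2 : PySem.List.pyGet? palette (ci * 3 + 1) = some (PySem.List.pyGetD palette (ci * 3 + 1) 0) := by
    rcases he : PySem.List.pyGet? palette (ci * 3 + 1) with _ | v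
    · exact absurd ((PySem.List.pyGet?_eq_none_iff _ _).mp he) (by simpa using h2)
    · simp [PySem.List.pyGetD, he]
  have e3 : PySem.List.pyGet? palette (ci * 3 + 2) = some (PySem.List.pyGetD palette (ci * 3 + 2) 0) := by
    rcases he : PySem.List.pyGet? palette (ci * 3 + 2) with _ | v
    · exact absurd ((PySem.List.pyGet?_eq_none_iff _ _).mp he) (by simpa using h3)
    · simp [PySem.List.pyGetD, he]
  rw [e1, e2, e3]
  rfl

-- B's bucket-scan loop over (index, flag) pairs is a filterMap of the entry function
lemma pvFoldB (palette : List Int) (lo : Int) (qs : List (Int × Bool)) (acc : List String)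
    (h : ∀ q ∈ qs, q.2 = true → pvOk palette (lo + q.1)) :
    qs.foldl
      (fun out oh =>
        if oh.2 then
          match PySem.List.pyGet? palette ((lo + oh.1) * 3) with
          | none => out
          | some pr =>
            match PySem.List.pyGet? palette ((lo + oh.1) * 3 + 1) with
            | none => out
            | some pg =>
              match PySem.List.pyGet? palette ((lo + oh.1) * 3 + 2) with
              | none => out
              | some pb =>
                  out ++ ["#" ++ PySem.Int.toStr (lo + oh.1) ++ ";2;"
                          ++ PySem.Int.toStr (PySem.Int.floordiv (pr * 100) 255) ++ ";"
                          ++ PySem.Int.toStr (PySem.Int.floordiv (pg * 100) 255) ++ ";"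
                          ++ PySem.Int.toStr (PySem.Int.floordiv (pb * 100) 255)]
        else out)
      acc = acc ++ qs.filterMap (fun q => if q.2 then some (pvEntry palette (lo + q.1)) else none) := by
  induction qs generalizing acc with
  | nil => simp
  | cons q qs ih =>
    rw [List.foldl_cons]
    by_cases hq : q.2 = true
    · rw [if_pos hq, pvStepB palette acc (lo + q.1) (h q (by simp) hq),
        ih (acc ++ [pvEntry palette (lo + q.1)]) (fun r hr => h r (by simp [hr]))]
      simp [hq]
    · rw [if_neg hq, ih acc (fun r hr => h r (by simp [hr]))]
      simp [hq]

-- scanning the marked buckets in index order yields the entry list of the ascending distinct colors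
lemma pvEnum (palette : List Int) (lo : Int) (pixels : List Int) (seen : List Bool)
    (hget : ∀ k : Nat, k < seen.length → seen[k]? = some (decide ((lo + (k : Int)) ∈ pixels))) :
    (PySem.List.enumerate seen).filterMap
        (fun q => if q.2 then some (pvEntry palette (lo + q.1)) else none)
      = ((List.range seen.length).filterMap
          (fun k : Nat => if (lo + (k : Int)) ∈ pixels then some (lo + (k : Int)) else none)).map
          (pvEntry palette) := by
  rw [PySem.List.enumerate_eq_map_pyRange seen false,
    show PySem.List.len seen = ((seen.length : Nat) : Int) from by simp [PySem.List.len],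
    PySem.List.pyRange_zero_natCast, List.filterMap_map, List.filterMap_map, List.map_filterMap]
  refine List.filterMap_congr ?_
  intro k hk
  have hk' : k < seen.length := List.mem_range.mp hk
  have hgd : seen.getD k false = decide ((lo + (k : Int)) ∈ pixels) := by
    rw [List.getD_eq_getElem?_getD, hget k hk']; rfl
  simp only [Function.comp_apply, PySem.List.pyGetD_natCast, hgd]
  by_cases hmem : (lo + (k : Int)) ∈ pixels <;> simp [hmem]

-- ===== VERDICT (by name: the statement is the Claim_ definition above) =====
theorem sixel_palette_py_spec : Claim_equal_sixel_palette_py := by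
  intro pixels palette _hdom hpre
  unfold Spec_sixel_palette_py
  by_cases hne : pixels = []
  · subst hne; rfl
  · rcases hmin : PySem.List.min? pixels (fun x => x) with _ | lo
    · exact absurd ((PySem.List.min?_eq_none_iff _ _).mp hmin) hne
    rcases hmax : PySem.List.max? pixels (fun x => x) with _ | hi
    · exact absurd ((PySem.List.max?_eq_none_iff _ _).mp hmax) hne
    have hlo : ∀ p ∈ pixels, lo ≤ p := PySem.List.min?_isMin hmin
    have hhi : ∀ p ∈ pixels, p ≤ hi := PySem.List.max?_isMax hmax
    have hlohi : lo ≤ hi := by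
      rcases List.exists_mem_of_ne_nil pixels hne with ⟨p, hp⟩
      exact le_trans (hlo p hp) (hhi p hp)
    have hs0len : (List.replicate (hi - lo + 1).toNat false).length = (hi - lo + 1).toNat := by simp
    have hseenlen :
        (pixels.foldl (fun s p => PySem.List.pySetD s (p - lo) true)
          (List.replicate (hi - lo + 1).toNat false)).length = (hi - lo + 1).toNat := by
      rw [pvMarkLen, hs0len]
    have hbound : ∀ p ∈ pixels,
        lo ≤ p ∧ (p - lo).toNat < (List.replicate (hi - lo + 1).toNat false).length := by
      intro p hp
      have := hlo p hp; have := hhi p hp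
      rw [hs0len]
      omega
    have hseenget : ∀ i : Nat, i < (hi - lo + 1).toNat →
        (pixels.foldl (fun s p => PySem.List.pySetD s (p - lo) true)
          (List.replicate (hi - lo + 1).toNat false))[i]? =
          some (decide ((lo + (i : Int)) ∈ pixels)) := by
      intro i hi'
      rw [pvMark lo pixels _ hbound i (by rw [hs0len]; omega)]
      simp
    have hmemL : ∀ x, x ∈ (List.range (hi - lo + 1).toNat).filterMap
        (fun k : Nat => if (lo + (k : Int)) ∈ pixels then some (lo + (k : Int)) else none)
        ↔ x ∈ pixels := by
      intro x
      constructor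
      · intro hx
        rcases List.mem_filterMap.mp hx with ⟨k, _, hk⟩
        split at hk
        · cases hk; assumption
        · cases hk
      · intro hx
        refine List.mem_filterMap.mpr ⟨(x - lo).toNat, ?_, ?_⟩
        · have := hlo x hx; have := hhi x hx
          exact List.mem_range.mpr (by omega)
        · have := hlo x hx
          have hx' : lo + (((x - lo).toNat : Nat) : Int) = x := by omega
          rw [hx']
          simp [hx]
    have hpairL : ((List.range (hi - lo + 1).toNat).filterMap
        (fun k : Nat => if (lo + (k : Int)) ∈ pixels then some (lo + (k : Int)) else none)).Pairwise
        (fun a b => a < b) := by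
      refine List.pairwise_filterMap.mpr (List.pairwise_lt_range.imp ?_)
      intro a b hab x hx y hy
      split at hx
      · cases hx
        split at hy
        · cases hy; omega
        · cases hy
      · cases hx
    have hnodupL := hpairL.imp (fun h => ne_of_lt h)
    have hsorted : PySem.List.sorted (PySem.Set.ofList pixels) (fun x => x)
        = (List.range (hi - lo + 1).toNat).filterMap
          (fun k : Nat => if (lo + (k : Int)) ∈ pixels then some (lo + (k : Int)) else none) := by
      refine PySem.List.sorted_eq_of_perm_of_pairwise_lt _ _ _ ?_ hpairL
      refine List.perm_of_nodup_nodup_toFinset_eq hnodupL (PySem.Set.nodup_ofList pixels) ?_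
      ext x
      simp only [List.mem_toFinset, hmemL x, PySem.Set.mem_ofList]
    have hokL : ∀ ci ∈ (List.range (hi - lo + 1).toNat).filterMap
        (fun k : Nat => if (lo + (k : Int)) ∈ pixels then some (lo + (k : Int)) else none),
        pvOk palette ci := fun ci hci => hpre ci ((hmemL ci).mp hci)
    have hA : sixel_palette_py pixels palette
        = ((List.range (hi - lo + 1).toNat).filterMap
            (fun k : Nat => if (lo + (k : Int)) ∈ pixels then some (lo + (k : Int)) else none)).map
            (pvEntry palette) := by
      rw [sixel_palette_py, hsorted, pvFoldA palette _ [] hokL, List.nil_append]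
    have hokQ : ∀ q ∈ PySem.List.enumerate
        (pixels.foldl (fun s p => PySem.List.pySetD s (p - lo) true)
          (List.replicate (hi - lo + 1).toNat false)),
        q.2 = true → pvOk palette (lo + q.1) := by
      intro q hq hq2
      rcases (PySem.List.mem_enumerate_iff _ _ _).mp hq with ⟨k, hk, hqk⟩
      have hk' : k < (hi - lo + 1).toNat := by rw [← hseenlen]; exact hk
      have := hseenget k hk'
      rw [List.getElem?_eq_getElem hk] at this
      have hval := Option.some.inj this
      subst hqk
      simp only [hval, decide_eq_true_eq] at hq2
      exact hpre _ (by simpa using hq2)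
    have hB : sixel_palette_py_alt pixels palette
        = ((List.range (hi - lo + 1).toNat).filterMap
            (fun k : Nat => if (lo + (k : Int)) ∈ pixels then some (lo + (k : Int)) else none)).map
            (pvEntry palette) := by
      rw [sixel_palette_py_alt, if_neg hne, hmin, hmax]
      dsimp only
      rw [pvFoldB palette lo _ [] hokQ, List.nil_append,
        pvEnum palette lo pixels _ (by rw [hseenlen]; exact hseenget), hseenlen]
    rw [hA, hB]
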